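-- pv_equiv track=rewrite | github.com/jcarrasquel/hse-uamc-conformance-checking | models/aist/model_aist_A_deviation_control_flow.py | sellPriorityRule
-- ===== SOURCE A (Python) =====
-- def sellPriorityRule(sellOrder, orderBookSellSide):
-- 	# This function returns true if sellOrder is the highest ranked order in the sell side of the order book, false otherwise
--
-- 	# This function returns true if buyOrder is the highest ranked order in the buy side of the order book, false otherwise
-- 	orderPrice = sellOrder[2]
-- 	orderArrivalTime = sellOrder[1]
-- 	orderIdentifier = sellOrder[0]
--
-- 	ishighestRankedSellOrder = True # "He is innocent, till we demonstrate the opposite" For now, we believe he is the highest ranked order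
--
-- 	for i in range(len(orderBookSellSide)):
-- 		nextSellOrder = orderBookSellSide[i]
-- 		if nextSellOrder[0] != orderIdentifier: # check that we are not checking the same order
-- 			if not( (orderPrice < nextSellOrder[2]) or (orderPrice == nextSellOrder[2] and orderArrivalTime <= nextSellOrder[1])):
-- 				# Priority rule, violated
-- 				ishighestRankedSellOrder = False
-- 				break
--
-- 	return ishighestRankedSellOrder == True
-- ===== SOURCE B (Python) =====
-- def sellPriorityRule(sellOrder, orderBookSellSide):
--     key = (sellOrder[2], sellOrder[1])
--     others = [(o[2], o[1]) for o in orderBookSellSide if o[0] != sellOrder[0]]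
--     if not others:
--         return True
--     return key <= min(others)
-- ===== Notes on version B (the rewrite author's own statement) =====
-- stated objective: simpler
-- what changed: Replaced the per-element dominance test with early break by building the (price, arrival) keys of the other orders and doing one lexicographic comparison of the order's key against their minimum.
import Mathlib
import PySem

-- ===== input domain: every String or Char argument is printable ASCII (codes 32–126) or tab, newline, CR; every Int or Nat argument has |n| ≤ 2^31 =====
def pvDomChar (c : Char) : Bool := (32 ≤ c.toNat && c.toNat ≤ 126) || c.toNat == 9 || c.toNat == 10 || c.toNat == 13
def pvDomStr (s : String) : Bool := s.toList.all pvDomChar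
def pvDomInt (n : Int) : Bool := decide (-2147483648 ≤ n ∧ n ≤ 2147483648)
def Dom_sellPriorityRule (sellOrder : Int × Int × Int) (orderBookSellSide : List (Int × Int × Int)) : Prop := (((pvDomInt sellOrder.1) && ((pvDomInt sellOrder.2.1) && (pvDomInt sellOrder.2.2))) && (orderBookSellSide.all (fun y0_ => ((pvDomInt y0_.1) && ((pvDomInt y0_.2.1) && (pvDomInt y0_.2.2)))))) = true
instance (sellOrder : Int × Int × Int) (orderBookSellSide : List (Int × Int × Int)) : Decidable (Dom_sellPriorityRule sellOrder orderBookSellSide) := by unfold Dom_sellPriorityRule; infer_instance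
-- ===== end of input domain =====

-- B computes the lexicographic minimum (price, arrival) key of the other orders and compares once;
-- A scans with a per-element dominance test and early break. Objective: simpler.

-- ===== PORT A =====
-- A's indexed loop with break, as structural recursion over the book (same iteration order, same state)
def sellPriorityRuleLoop (orderIdentifier orderArrivalTime orderPrice : Int) :
    List (Int × Int × Int) → Bool
  | [] => true
  | nextSellOrder :: rest =>
      if nextSellOrder.1 ≠ orderIdentifier then
        if ¬ ((orderPrice < nextSellOrder.2.2) ∨
              (orderPrice = nextSellOrder.2.2 ∧ orderArrivalTime ≤ nextSellOrder.2.1)) then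
          false  -- break with ishighestRankedSellOrder = False
        else sellPriorityRuleLoop orderIdentifier orderArrivalTime orderPrice rest
      else sellPriorityRuleLoop orderIdentifier orderArrivalTime orderPrice rest

def sellPriorityRule (sellOrder : Int × Int × Int) (orderBookSellSide : List (Int × Int × Int)) : Bool :=
  sellPriorityRuleLoop sellOrder.1 sellOrder.2.1 sellOrder.2.2 orderBookSellSide

-- ===== PORT B =====
-- Python tuple `<=` / `<` on (Int, Int), lexicographic
def lexLe (p q : Int × Int) : Bool := p.1 < q.1 || (p.1 == q.1 && p.2 ≤ q.2)
def lexLt (p q : Int × Int) : Bool := p.1 < q.1 || (p.1 == q.1 && p.2 < q.2)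
-- Python's min over a nonempty list: keep current, replace when strictly smaller
def minLex (a b : Int × Int) : Int × Int := if lexLt b a then b else a

def sellPriorityRule_alt (sellOrder : Int × Int × Int) (orderBookSellSide : List (Int × Int × Int)) : Bool :=
  let key : Int × Int := (sellOrder.2.2, sellOrder.2.1)
  let others := orderBookSellSide.filterMap
    (fun o => if o.1 ≠ sellOrder.1 then some (o.2.2, o.2.1) else none)
  match others with
  | [] => true
  | h :: t => lexLe key (t.foldl minLex h)

-- ===== PRECONDITION & SPEC =====
def Spec_sellPriorityRule (sellOrder : Int × Int × Int) (orderBookSellSide : List (Int × Int × Int)) (out : Bool) : Prop := out = sellPriorityRule_alt sellOrder orderBookSellSide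
instance (sellOrder : Int × Int × Int) (orderBookSellSide : List (Int × Int × Int)) (out : Bool) : Decidable (Spec_sellPriorityRule sellOrder orderBookSellSide out) := by unfold Spec_sellPriorityRule; infer_instance

-- ===== CLAIM (what is proved, stated in full; the proofs are below) =====
def Claim_equal_sellPriorityRule : Prop := ∀ (sellOrder : Int × Int × Int) (orderBookSellSide : List (Int × Int × Int)), Dom_sellPriorityRule sellOrder orderBookSellSide → Spec_sellPriorityRule sellOrder orderBookSellSide (sellPriorityRule sellOrder orderBookSellSide)

-- ===== LEMMAS AND PROOFS =====
theorem lexLe_minLex (p a b : Int × Int) :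
    lexLe p (minLex a b) = (lexLe p a && lexLe p b) := by
  obtain ⟨p1, p2⟩ := p; obtain ⟨a1, a2⟩ := a; obtain ⟨b1, b2⟩ := b
  simp only [minLex, lexLt, lexLe]
  split_ifs with h <;> simp_all <;> omega

theorem lexLe_foldl_minLex (p : Int × Int) :
    ∀ (t : List (Int × Int)) (h : Int × Int),
      lexLe p (t.foldl minLex h) = (lexLe p h && t.all (lexLe p))
  | [], h => by simp
  | x :: t, h => by
    simp only [List.foldl_cons, List.all_cons, lexLe_foldl_minLex p t (minLex h x), lexLe_minLex]
    cases lexLe p h <;> cases lexLe p x <;> simp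

theorem lexLe_eq_decide (p q : Int × Int) :
    lexLe p q = decide (p.1 < q.1 ∨ (p.1 = q.1 ∧ p.2 ≤ q.2)) := by
  have h : (p.1 == q.1) = decide (p.1 = q.1) := by
    by_cases hp : p.1 = q.1 <;> simp [hp]
  simp [lexLe, h]

theorem loop_eq_all (oid oat op : Int) :
    ∀ (l : List (Int × Int × Int)),
      sellPriorityRuleLoop oid oat op l
        = l.all (fun o => o.1 == oid || lexLe (op, oat) (o.2.2, o.2.1))
  | [] => rfl
  | o :: rest => by
    simp only [sellPriorityRuleLoop, List.all_cons, lexLe_eq_decide]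
    by_cases h1 : o.1 = oid
    · simp [h1, loop_eq_all oid oat op rest, lexLe_eq_decide]
    · by_cases h2 : (op < o.2.2) ∨ (op = o.2.2 ∧ oat ≤ o.2.1)
      · simp [h1, h2, loop_eq_all oid oat op rest, lexLe_eq_decide]
      · simp [h1, h2]

theorem alt_eq_all (s : Int × Int × Int) (l : List (Int × Int × Int)) :
    sellPriorityRule_alt s l
      = l.all (fun o => o.1 == s.1 || lexLe (s.2.2, s.2.1) (o.2.2, o.2.1)) := by
  simp only [sellPriorityRule_alt]
  induction l with
  | nil => rfl
  | cons o rest ih =>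
    simp only [List.filterMap_cons, List.all_cons]
    by_cases h : o.1 = s.1
    · simp only [h, ne_eq, not_true_eq_false, if_false, beq_self_eq_true, Bool.true_or]
      exact ih
    · simp only [ne_eq, h, not_false_iff, if_true, beq_eq_false_iff_ne.mpr h, Bool.false_or]
      cases hM : rest.filterMap (fun o => if o.1 ≠ s.1 then some (o.2.2, o.2.1) else none) with
      | nil => simp only [hM] at ih; simp [ih]
      | cons h' t' =>
        simp only [hM] at ih
        simp only [List.foldl_cons, lexLe_foldl_minLex, lexLe_minLex] at *
        rw [← ih]
        cases lexLe (s.2.2, s.2.1) (o.2.2, o.2.1) <;> simp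

-- ===== VERDICT (by name: the statement is the Claim_ definition above) =====
theorem sellPriorityRule_spec : Claim_equal_sellPriorityRule := by
  intro s l _
  unfold Spec_sellPriorityRule
  rw [alt_eq_all, sellPriorityRule, loop_eq_all]
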